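-- pv_equiv track=rewrite | github.com/nurusysyabani/mpm-test-ama | break_string.py | break_string
-- ===== SOURCE A (Python) =====
-- def break_string(s, dictionary):
--     n = len(s)
--     list_result = []
--
--     for i in range(n):
--         for segment in range(i + 1, n + 1):
--             for word in dictionary:
--                 if s[i : segment] == word:
--                     list_result.append(s[i : segment])
--
--     string_result = ', '.join(list_result)
--     return string_result
-- ===== SOURCE B (Python) =====
-- def break_string(s, dictionary):
--     # Sort the (non-empty) words by length once; then a single scan over the
--     # start positions emits, at each position, every word that matches there.
--     # Words matching at the same position with the same length are the same
--     # string, so the length-sorted order reproduces A's substring enumeration.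
--     words = sorted([w for w in dictionary if w], key=len)
--     out = []
--     for i in range(len(s)):
--         for w in words:
--             if s.startswith(w, i):
--                 out.append(w)
--     return ', '.join(out)
-- ===== Notes on version B (the rewrite author's own statement) =====
-- stated objective: faster
-- what changed: B sorts the non-empty dictionary words by length once and then, in a single scan over start positions, emits every word that startswith-matches there, replacing A's enumeration of all O(n^2) substrings each sliced and compared against the whole dictionary.
import Mathlib
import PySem

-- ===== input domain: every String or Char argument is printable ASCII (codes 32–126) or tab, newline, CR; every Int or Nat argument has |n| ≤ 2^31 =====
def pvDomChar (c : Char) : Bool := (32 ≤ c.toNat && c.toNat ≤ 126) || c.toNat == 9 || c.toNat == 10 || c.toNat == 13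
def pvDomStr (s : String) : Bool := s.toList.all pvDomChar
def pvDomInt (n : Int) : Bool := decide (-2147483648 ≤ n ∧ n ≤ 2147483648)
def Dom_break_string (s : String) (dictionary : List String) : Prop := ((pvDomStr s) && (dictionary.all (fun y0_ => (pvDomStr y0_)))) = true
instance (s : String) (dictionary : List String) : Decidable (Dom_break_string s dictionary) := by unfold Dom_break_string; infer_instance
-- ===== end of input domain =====

-- B sorts the non-empty words by length once and emits, in one scan over start positions,
-- every word matching there, instead of A's enumeration of all substrings against the dictionary.

-- ===== PORT A =====
def break_string (s : String) (dictionary : List String) : String :=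
  let n : Int := PySem.Str.len s
  let list_result : List String :=
    (PySem.List.pyRange 0 n 1).foldl (fun acc i =>
      (PySem.List.pyRange (i + 1) (n + 1) 1).foldl (fun acc segment =>
        dictionary.foldl (fun acc word =>
          if PySem.Str.slice s (some i) (some segment) == word then
            acc ++ [PySem.Str.slice s (some i) (some segment)]
          else acc) acc) acc) []
  PySem.Str.join ", " list_result

-- ===== PORT B =====
def break_string_alt (s : String) (dictionary : List String) : String :=
  -- words = sorted([w for w in dictionary if w], key=len)
  let words : List String :=
    PySem.List.sorted (dictionary.filter (fun w => !(w == ""))) (fun w => PySem.Str.len w) false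
  let out : List String :=
    (PySem.List.pyRange 0 (PySem.Str.len s) 1).foldl (fun acc i =>
      words.foldl (fun acc w =>
        -- s.startswith(w, i): for 0 ≤ i this is exactly s[i : i+len(w)] == w
        if PySem.Str.slice s (some i) (some (i + PySem.Str.len w)) == w then acc ++ [w]
        else acc) acc) []
  PySem.Str.join ", " out

-- ===== PRECONDITION & SPEC =====
def Spec_break_string (s : String) (dictionary : List String) (out : String) : Prop := out = break_string_alt s dictionary
instance (s : String) (dictionary : List String) (out : String) : Decidable (Spec_break_string s dictionary out) := by unfold Spec_break_string; infer_instance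

-- ===== CLAIM (what is proved, stated in full; the proofs are below) =====
def Claim_equal_break_string : Prop := ∀ (s : String) (dictionary : List String), Dom_break_string s dictionary → Spec_break_string s dictionary (break_string s dictionary)

-- ===== LEMMAS AND PROOFS =====

-- Two length-ordered lists that are permutations of each other and whose equal-length
-- elements coincide are equal.
theorem pv_eq_of_perm_of_pairwise (key : String → Int) :
    ∀ (l₁ l₂ : List String), l₁.Perm l₂ →
      l₁.Pairwise (fun a b => key a ≤ key b) → l₂.Pairwise (fun a b => key a ≤ key b) →
      (∀ a ∈ l₁, ∀ b ∈ l₂, key a = key b → a = b) → l₁ = l₂ := by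
  intro l₁
  induction l₁ with
  | nil => intro l₂ hp _ _ _; exact (hp.nil_eq).symm ▸ rfl
  | cons a t₁ ih =>
    intro l₂ hp h₁ h₂ hun
    cases l₂ with
    | nil => exact absurd hp.symm.nil_eq (by simp)
    | cons b t₂ =>
      have hab : a = b := by
        have hamem : a ∈ b :: t₂ := hp.mem_iff.mp (by simp)
        have hbmem : b ∈ a :: t₁ := hp.mem_iff.mpr (by simp)
        have h1 : key a ≤ key b := by
          rcases List.mem_cons.mp hbmem with h | h
          · exact le_of_eq (by rw [h])
          · exact List.rel_of_pairwise_cons h₁ h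
        have h2 : key b ≤ key a := by
          rcases List.mem_cons.mp hamem with h | h
          · exact le_of_eq (by rw [h])
          · exact List.rel_of_pairwise_cons h₂ h
        exact hun a (by simp) b (by simp) (le_antisymm h1 h2)
      subst hab
      have hp' : t₁.Perm t₂ := hp.cons_inv
      have := ih t₂ hp' h₁.of_cons h₂.of_cons
        (fun x hx y hy hxy => hun x (by simp [hx]) y (by simp [hy]) hxy)
      rw [this]

-- filter p l ++ filter q l is a permutation of filter (p || q) l when p and q are disjoint.
theorem pv_filter_or_perm (p q : String → Bool)
    (hdisj : ∀ w, p w = true → q w = true → False) :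
    ∀ l : List String, (l.filter p ++ l.filter q).Perm (l.filter (fun w => p w || q w)) := by
  intro l
  induction l with
  | nil => simp
  | cons w t ih =>
    by_cases hp : p w = true
    · have hq : q w = false := by
        cases hq : q w
        · rfl
        · exact absurd (hdisj w hp hq) (by simp)
      simpa [hp, hq] using ih
    · simp at hp
      by_cases hq : q w = true
      · simp only [List.filter_cons, hp, hq, Bool.or_true, if_false,
          Bool.false_eq_true, if_pos]
        exact (List.perm_middle).trans (ih.cons w)
      · simp at hq
        simpa [hp, hq] using ih

-- A flatMap of disjoint filters over a duplicate-free index list is a permutation of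
-- the single filter by "some index matches".
theorem pv_flatMap_filter_perm (p : Int → String → Bool) (dict : List String) :
    ∀ (segs : List Int) (q : String → Bool), segs.Nodup →
      (∀ w, q w = true ↔ ∃ seg ∈ segs, p seg w = true) →
      (∀ w s1 s2, s1 ∈ segs → s2 ∈ segs → p s1 w = true → p s2 w = true → s1 = s2) →
      (segs.flatMap (fun seg => dict.filter (p seg))).Perm (dict.filter q) := by
  intro segs
  induction segs with
  | nil =>
    intro q _ hq _
    have : dict.filter q = [] := by
      apply List.filter_eq_nil_iff.mpr
      intro w _ hw
      rcases (hq w).mp hw with ⟨seg, hseg, _⟩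
      simp at hseg
    simp [this]
  | cons seg rest ih =>
    intro q hnd hq hu
    have hnd' : rest.Nodup := (List.nodup_cons.mp hnd).2
    have hseg_not : seg ∉ rest := (List.nodup_cons.mp hnd).1
    have ihp := ih (fun w => decide (∃ s ∈ rest, p s w = true)) hnd'
      (fun w => decide_eq_true_iff)
      (fun w s1 s2 hs1 hs2 => hu w s1 s2 (by simp [hs1]) (by simp [hs2]))
    have hdisj : ∀ w, p seg w = true → (decide (∃ s ∈ rest, p s w = true)) = true → False := by
      intro w h1 h2
      simp at h2
      rcases h2 with ⟨s, hs, hps⟩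
      exact hseg_not ((hu w seg s (by simp) (by simp [hs]) h1 hps) ▸ hs)
    have step1 : ((seg :: rest).flatMap (fun sg => dict.filter (p sg))).Perm
        (dict.filter (p seg) ++ dict.filter (fun w => decide (∃ s ∈ rest, p s w = true))) := by
      simp only [List.flatMap_cons]
      exact ihp.append_left _
    have step2 : (dict.filter (p seg) ++
          dict.filter (fun w => decide (∃ s ∈ rest, p s w = true))).Perm
        (dict.filter (fun w => p seg w || decide (∃ s ∈ rest, p s w = true))) :=
      pv_filter_or_perm _ _ hdisj dict
    have step3 : dict.filter (fun w => p seg w || decide (∃ s ∈ rest, p s w = true))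
        = dict.filter q := by
      apply List.filter_congr
      intro w _
      refine Bool.eq_iff_iff.mpr ?_
      rw [hq w]
      simp only [Bool.or_eq_true, decide_eq_true_eq]
      constructor
      · rintro (h | ⟨s', hs', hps'⟩)
        · exact ⟨seg, by simp, h⟩
        · exact ⟨s', by simp [hs'], hps'⟩
      · rintro ⟨s', hs', hps'⟩
        rcases List.mem_cons.mp hs' with h | h
        · exact Or.inl (h ▸ hps')
        · exact Or.inr ⟨s', h, hps'⟩
    exact (step1.trans step2).trans (step3 ▸ List.Perm.refl _)

-- length of s[i:b] for 0 ≤ i ≤ b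
theorem pv_slice_len (s : String) (i b : Int) (h0 : 0 ≤ i) (hb : 0 ≤ b) :
    (PySem.Str.slice s (some i) (some b)).toList.length
      = min (b.toNat - i.toNat) (s.toList.length - i.toNat) := by
  simp [PySem.Str.slice, PySem.List.slice_toNat _ h0 hb, List.length_take, List.length_drop]

-- a matching slice determines the word and its length
theorem pv_match_len (s : String) (i seg : Int) (w : String)
    (h0 : 0 ≤ i) (his : i < seg) (hsn : seg ≤ (s.toList.length : Int))
    (h : PySem.Str.slice s (some i) (some seg) = w) :
    (w.toList.length : Int) = seg - i := by
  have := pv_slice_len s i seg h0 (by omega)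
  rw [h] at this
  have ht1 : i.toNat = i := Int.toNat_of_nonneg h0
  have ht2 : seg.toNat = seg := Int.toNat_of_nonneg (by omega)
  omega

-- the characterisation of B's filter predicate as "some segment matches"
theorem pv_pred_iff (s : String) (i : Int)
    (h0 : 0 ≤ i) (hn : i < PySem.Str.len s) (w : String) :
    ((!(w == "")) && (PySem.Str.slice s (some i) (some (i + PySem.Str.len w)) == w)) = true
      ↔ ∃ seg ∈ PySem.List.pyRange (i + 1) (PySem.Str.len s + 1),
          (PySem.Str.slice s (some i) (some seg) == w) = true := by
  have hn' : i < (s.toList.length : Int) := by simpa [PySem.Str.len_eq] using hn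
  have ht : i.toNat = i := Int.toNat_of_nonneg h0
  simp only [Bool.and_eq_true, Bool.not_eq_eq_eq_not, Bool.not_true, beq_eq_false_iff_ne,
    ne_eq, beq_iff_eq, PySem.List.mem_pyRange_one, PySem.Str.len_eq]
  constructor
  · rintro ⟨hne, heq⟩
    have hLpos : 0 < w.toList.length := by
      rcases Nat.eq_zero_or_pos w.toList.length with h | h
      · exact absurd (String.toList_inj.mp (by simpa using List.eq_nil_of_length_eq_zero h)) hne
      · exact h
    have hlen := pv_slice_len s i (i + (w.toList.length : Int)) h0 (by omega)
    rw [heq] at hlen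
    have hle : i + (w.toList.length : Int) ≤ (s.toList.length : Int) := by omega
    exact ⟨i + (w.toList.length : Int), ⟨by omega, by omega⟩, heq⟩
  · rintro ⟨seg, ⟨hs1, hs2⟩, heq⟩
    have hL := pv_match_len s i seg w h0 (by omega) (by omega) heq
    have hne : ¬ w = "" := by
      intro h; subst h; simp at hL; omega
    have harg : i + (w.toList.length : Int) = seg := by omega
    exact ⟨hne, by rw [harg]; exact heq⟩

-- A's inner loop appends the slice once per equal word; the filtered list itself.
theorem pv_map_const_filter (l : List String) (v : String) :
    (l.filter (fun w => v == w)).map (fun _ => v) = l.filter (fun w => v == w) := by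
  induction l with
  | nil => rfl
  | cons w t ih =>
    by_cases h : v = w
    · subst h; simpa using ih
    · simp only [List.filter_cons, beq_iff_eq, h, if_false]
      exact ih

-- the body of the outer loop agrees between the two ports at every admissible i
theorem pv_block_eq (s : String) (dict : List String) (i : Int)
    (h0 : 0 ≤ i) (hn : i < PySem.Str.len s) :
    (PySem.List.pyRange (i + 1) (PySem.Str.len s + 1)).flatMap
        (fun seg => dict.filter (fun w => PySem.Str.slice s (some i) (some seg) == w))
      = (PySem.List.sorted (dict.filter (fun w => !(w == ""))) (fun w => PySem.Str.len w) false).filter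
          (fun w => PySem.Str.slice s (some i) (some (i + PySem.Str.len w)) == w) := by
  have hn' : i < (s.toList.length : Int) := by simpa [PySem.Str.len_eq] using hn
  -- A member of the seg-group is the slice and has length seg - i.
  have hmemL : ∀ seg ∈ PySem.List.pyRange (i + 1) (PySem.Str.len s + 1),
      ∀ w ∈ dict.filter (fun w => PySem.Str.slice s (some i) (some seg) == w),
        w = PySem.Str.slice s (some i) (some seg) ∧ (w.toList.length : Int) = seg - i := by
    intro seg hseg w hw
    obtain ⟨hs1, hs2⟩ := PySem.List.mem_pyRange_one.mp hseg
    rw [PySem.Str.len_eq] at hs2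
    have heq : PySem.Str.slice s (some i) (some seg) = w :=
      beq_iff_eq.mp (List.mem_filter.mp hw).2
    exact ⟨heq.symm, pv_match_len s i seg w h0 (by omega) (by omega) heq⟩
  apply pv_eq_of_perm_of_pairwise (fun w => PySem.Str.len w)
  · -- the two sides are permutations of the same filter of the dictionary
    have hperm1 := pv_flatMap_filter_perm
      (fun seg w => PySem.Str.slice s (some i) (some seg) == w) dict
      (PySem.List.pyRange (i + 1) (PySem.Str.len s + 1))
      (fun w => (!(w == "")) && (PySem.Str.slice s (some i) (some (i + PySem.Str.len w)) == w))
      (PySem.List.nodup_pyRange_one _ _)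
      (fun w => pv_pred_iff s i h0 hn w)
      (by
        intro w s1 s2 hs1 hs2 h1 h2
        obtain ⟨ha1, ha2⟩ := PySem.List.mem_pyRange_one.mp hs1
        obtain ⟨hb1, hb2⟩ := PySem.List.mem_pyRange_one.mp hs2
        rw [PySem.Str.len_eq] at ha2 hb2
        have e1 := pv_match_len s i s1 w h0 (by omega) (by omega) (beq_iff_eq.mp h1)
        have e2 := pv_match_len s i s2 w h0 (by omega) (by omega) (beq_iff_eq.mp h2)
        omega)
    have hperm2 : ((PySem.List.sorted (dict.filter (fun w => !(w == "")))
            (fun w => PySem.Str.len w) false).filter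
          (fun w => PySem.Str.slice s (some i) (some (i + PySem.Str.len w)) == w)).Perm
        (dict.filter (fun w => (!(w == "")) &&
          (PySem.Str.slice s (some i) (some (i + PySem.Str.len w)) == w))) := by
      refine ((PySem.List.sorted_perm (dict.filter (fun w => !(w == "")))
          (fun w => PySem.Str.len w) false).filter _).trans ?_
      rw [List.filter_filter]
      exact (List.filter_congr (fun w _ => Bool.and_comm _ _)) ▸ List.Perm.refl _
    exact hperm1.trans hperm2.symm
  · -- left side: lengths increase with the segment
    rw [List.pairwise_flatMap]
    constructor
    · intro seg hseg
      apply List.pairwise_of_forall_mem_list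
      intro a ha b hb
      have e1 := (hmemL seg hseg a ha).2
      have e2 := (hmemL seg hseg b hb).2
      simp only [PySem.Str.len_eq]
      omega
    · have hpw := PySem.List.pairwise_lt_pyRange_one (i + 1) (PySem.Str.len s + 1)
      refine (List.Pairwise.and_mem.mp hpw).imp ?_
      rintro s1 s2 ⟨h1m, h2m, hlt⟩ x hx y hy
      have e1 := (hmemL s1 h1m x hx).2
      have e2 := (hmemL s2 h2m y hy).2
      simp only [PySem.Str.len_eq]
      omega
  · -- right side: the filtered sorted list stays length-sorted
    exact List.Pairwise.sublist List.filter_sublist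
      (PySem.List.sorted_pairwise (dict.filter (fun w => !(w == ""))) (fun w => PySem.Str.len w))
  · -- elements of equal length agree on both sides
    intro a ha b hb hk
    obtain ⟨seg, hseg, haf⟩ := List.mem_flatMap.mp ha
    obtain ⟨hae, hal⟩ := hmemL seg hseg a haf
    have hbe : PySem.Str.slice s (some i) (some (i + PySem.Str.len b)) = b :=
      beq_iff_eq.mp (List.mem_filter.mp hb).2
    have hkl : (a.toList.length : Int) = (b.toList.length : Int) := by
      simpa [PySem.Str.len_eq] using hk
    have harg : i + PySem.Str.len b = seg := by
      rw [PySem.Str.len_eq]; omega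
    rw [hae, ← harg, hbe]

-- ===== VERDICT (by name: the statement is the Claim_ definition above) =====
theorem break_string_spec : Claim_equal_break_string := by
  intro s dictionary _
  unfold Spec_break_string break_string break_string_alt
  simp only []
  congr 1
  apply PySem.List.foldl_congr_mem
  intro acc i hi
  obtain ⟨h0, hn⟩ := PySem.List.mem_pyRange_one.mp hi
  rw [PySem.List.foldl_congr_mem _ _
      (fun acc2 seg => acc2 ++ dictionary.filter (fun w => PySem.Str.slice s (some i) (some seg) == w))
      acc
      (by intro acc2 seg _
          rw [PySem.List.foldl_append_if
              (fun word => PySem.Str.slice s (some i) (some seg) == word)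
              (fun _ => PySem.Str.slice s (some i) (some seg)),
            pv_map_const_filter]),
    PySem.List.foldl_append_eq_flatMap,
    PySem.List.foldl_append_if_eq_filter
      (fun w => PySem.Str.slice s (some i) (some (i + PySem.Str.len w)) == w)
      (PySem.List.sorted (dictionary.filter (fun w => !(w == ""))) (fun w => PySem.Str.len w) false)
      acc, pv_block_eq s dictionary i h0 hn]
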